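-- pv_equiv track=rewrite | github.com/CptCookie/AOC | Python/2017/Day1/solution.py | sliding_window_of_2
-- ===== SOURCE A (Python) =====
-- import collections
-- from itertools import islice
--
-- def sliding_window_of_2(iterable):
--     it = iter(iterable)
--     window = collections.deque(islice(it, 2), maxlen=2)
--     if len(window) == 2:
--         yield tuple(window)
--     for x in it:
--         window.append(x)
--         yield tuple(window)
-- ===== SOURCE B (Python) =====
-- from itertools import tee
--
-- def sliding_window_of_2(iterable):
--     a, b = tee(iterable)
--     next(b, None)
--     yield from zip(a, b)
-- ===== Notes on version B (the rewrite author's own statement) =====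
-- stated objective: idiomatic
-- what changed: Replaces the mutable deque window (primed with islice and appended in a loop) with the standard itertools pairwise recipe: two tee'd iterators, the second advanced once, zipped together.
import Mathlib
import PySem

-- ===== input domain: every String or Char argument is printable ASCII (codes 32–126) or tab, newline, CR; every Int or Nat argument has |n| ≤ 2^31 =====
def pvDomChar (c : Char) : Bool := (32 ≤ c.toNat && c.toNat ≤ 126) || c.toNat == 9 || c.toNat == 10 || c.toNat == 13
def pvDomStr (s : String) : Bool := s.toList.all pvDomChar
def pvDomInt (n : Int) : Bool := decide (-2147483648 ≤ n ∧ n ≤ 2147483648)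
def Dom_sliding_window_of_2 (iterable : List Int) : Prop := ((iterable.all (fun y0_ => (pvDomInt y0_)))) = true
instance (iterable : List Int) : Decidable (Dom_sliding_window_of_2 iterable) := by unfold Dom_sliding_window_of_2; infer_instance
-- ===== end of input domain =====

-- B replaces A's mutable deque window with the itertools pairwise recipe (tee + zip): idiomatic, same O(n) cost.


-- ===== PORT A =====
-- A: prime a two-element window from the first two items; if full, yield it; then for each
-- remaining x, slide the window (drop left, append x) and yield it. State = (window, yields).
def sliding_window_of_2 (iterable : List Int) : List (Int × Int) :=
  match iterable with
  | a :: b :: rest =>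
      (rest.foldl
        (fun (st : (Int × Int) × List (Int × Int)) x =>
          let w := (st.1.2, x)
          (w, st.2 ++ [w]))
        ((a, b), [(a, b)])).2
  | _ => []

-- ===== PORT B =====
-- B: tee the iterator, advance the second copy once, zip the two: zip xs (xs.drop 1).
def sliding_window_of_2_alt (iterable : List Int) : List (Int × Int) :=
  iterable.zip (iterable.drop 1)

-- ===== PRECONDITION & SPEC =====
def Spec_sliding_window_of_2 (iterable : List Int) (out : List (Int × Int)) : Prop := out = sliding_window_of_2_alt iterable
instance (iterable : List Int) (out : List (Int × Int)) : Decidable (Spec_sliding_window_of_2 iterable out) := by unfold Spec_sliding_window_of_2; infer_instance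

-- ===== CLAIM (what is proved, stated in full; the proofs are below) =====
def Claim_equal_sliding_window_of_2 : Prop := ∀ (iterable : List Int), Dom_sliding_window_of_2 iterable → Spec_sliding_window_of_2 iterable (sliding_window_of_2 iterable)

-- ===== LEMMAS AND PROOFS =====
-- Loop invariant: from window (p, q) with accumulated output acc, folding over rest
-- appends exactly the adjacent pairs of q :: rest.
theorem pv_fold_pairs (rest : List Int) : ∀ (p q : Int) (acc : List (Int × Int)),
    (rest.foldl
      (fun (st : (Int × Int) × List (Int × Int)) x =>
        let w := (st.1.2, x)
        (w, st.2 ++ [w]))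
      ((p, q), acc)).2 = acc ++ (q :: rest).zip rest := by
  induction rest with
  | nil => intro p q acc; simp
  | cons x xs ih =>
      intro p q acc
      simp only [List.foldl_cons, List.zip_cons_cons]
      rw [ih]
      simp

-- ===== VERDICT (by name: the statement is the Claim_ definition above) =====
theorem sliding_window_of_2_spec : Claim_equal_sliding_window_of_2 := by
  intro iterable _
  unfold Spec_sliding_window_of_2 sliding_window_of_2 sliding_window_of_2_alt
  cases iterable with
  | nil => rfl
  | cons a t =>
    cases t with
    | nil => rfl
    | cons b rest =>
        show (rest.foldl
          (fun (st : (Int × Int) × List (Int × Int)) x =>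
            let w := (st.1.2, x)
            (w, st.2 ++ [w]))
          ((a, b), [(a, b)])).2 = _
        rw [pv_fold_pairs rest a b [(a, b)]]
        simp
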